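-- pv_equiv track=rewrite | github.com/Keijukainen311/NRRPGen | Generator/check_hc_inital.py | hc6_max_consec_shifts
-- ===== SOURCE A (Python) =====
-- def hc6_max_consec_shifts(array, max_consec_days):
--     for work_days in array:
--         count = 0
--         for num in work_days:
--             if num > 0:
--                 count += 1
--             else:
--                 count = 0
--             if count > max_consec_days:
--                 return False
--     return True
-- ===== SOURCE B (Python) =====
-- def _work_runs(row):
--     """Lengths of the maximal runs of consecutive positive entries in row."""
--     runs = []
--     cur = 0
--     for n in row:
--         if n > 0:
--             cur += 1
--         elif cur:
--             runs.append(cur)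
--             cur = 0
--     if cur:
--         runs.append(cur)
--     return runs
--
--
-- def hc6_max_consec_shifts(array, max_consec_days):
--     return all(r <= max_consec_days
--                for row in array
--                for r in _work_runs(row))
-- ===== Notes on version B (the rewrite author's own statement) =====
-- stated objective: alternative
-- what changed: B extracts each row's maximal runs of consecutive work days in one pass and then checks every run length against the limit, instead of A's running counter tested after every element with an early return.
-- intended difference: When max_consec_days is negative and some row is non-empty but no entry is positive, A returns False (it compares the reset counter 0 against the limit after every element), while B returns True: a schedule with no work days cannot exceed any maximum of consecutive work days, so B's value is the intended one. — e.g. on hc6_max_consec_shifts([[0]], -1): A returns false, B returns true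
import Mathlib
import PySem

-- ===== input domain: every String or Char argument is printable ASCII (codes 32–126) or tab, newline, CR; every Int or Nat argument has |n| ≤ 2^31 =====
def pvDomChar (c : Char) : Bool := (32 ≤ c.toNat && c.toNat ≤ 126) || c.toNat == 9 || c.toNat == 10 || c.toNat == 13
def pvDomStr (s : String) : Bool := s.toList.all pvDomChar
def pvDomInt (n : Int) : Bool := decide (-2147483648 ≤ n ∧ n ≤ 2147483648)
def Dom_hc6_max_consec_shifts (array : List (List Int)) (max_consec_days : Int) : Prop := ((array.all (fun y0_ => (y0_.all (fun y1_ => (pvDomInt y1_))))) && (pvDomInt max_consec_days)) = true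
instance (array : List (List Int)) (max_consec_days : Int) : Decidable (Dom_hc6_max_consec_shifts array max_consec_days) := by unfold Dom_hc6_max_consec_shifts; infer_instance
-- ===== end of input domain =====

-- B extracts each row's maximal runs of consecutive work days and checks the run lengths,
-- instead of A's running counter tested after every element; on a negative limit B accepts
-- all-off rows that A rejects (stated as the intended difference D_ below).

-- ===== PORT A =====
-- inner `for num in work_days` loop with the running `count` and the early `return False`
def pvRowLoopA (m : Int) : List Int → Int → Bool
  | [], _ => true
  | num :: rest, count =>
    let count' := if num > 0 then count + 1 else 0
    if count' > m then false else pvRowLoopA m rest count'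

def hc6_max_consec_shifts (array : List (List Int)) (max_consec_days : Int) : Bool :=
  array.all (fun work_days => pvRowLoopA max_consec_days work_days 0)

-- ===== PORT B =====
-- Source B's loop body in _work_runs: extend the current run, or flush it when it closes
def pvStep (st : List Nat × Nat) (n : Int) : List Nat × Nat :=
  if n > 0 then (st.1, st.2 + 1)
  else if st.2 ≠ 0 then (st.1 ++ [st.2], 0)
  else st

-- Source B's trailing flush `if cur: runs.append(cur)`
def pvFinish (st : List Nat × Nat) : List Nat :=
  if st.2 ≠ 0 then st.1 ++ [st.2] else st.1

def pvWorkRuns (row : List Int) : List Nat :=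
  pvFinish (row.foldl pvStep ([], 0))

def hc6_max_consec_shifts_alt (array : List (List Int)) (max_consec_days : Int) : Bool :=
  array.all (fun row => (pvWorkRuns row).all (fun r => decide ((r : Int) ≤ max_consec_days)))

-- ===== PRECONDITION & SPEC =====
-- When max_consec_days is negative and some row is non-empty but no entry is positive, A returns
-- False (it compares the reset counter 0 against the limit after every element), while B returns
-- True: a schedule with no work days cannot exceed any maximum of consecutive work days.
def D_hc6_max_consec_shifts (array : List (List Int)) (max_consec_days : Int) : Prop :=
  max_consec_days < 0 ∧ (∃ row ∈ array, row ≠ []) ∧ (∀ row ∈ array, ∀ n ∈ row, n ≤ 0)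
instance (array : List (List Int)) (max_consec_days : Int) : Decidable (D_hc6_max_consec_shifts array max_consec_days) := by unfold D_hc6_max_consec_shifts; infer_instance

def Spec_hc6_max_consec_shifts (array : List (List Int)) (max_consec_days : Int) (out : Bool) : Prop := ¬ D_hc6_max_consec_shifts array max_consec_days → out = hc6_max_consec_shifts_alt array max_consec_days
instance (array : List (List Int)) (max_consec_days : Int) (out : Bool) : Decidable (Spec_hc6_max_consec_shifts array max_consec_days out) := by unfold Spec_hc6_max_consec_shifts; infer_instance

def pvDiffWitness_hc6_max_consec_shifts : List (List Int) × Int := ([[0]], -1)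
def pvDiffWitnessOut_hc6_max_consec_shifts : Bool × Bool := (false, true)

-- ===== CLAIM (what is proved, stated in full; the proofs are below) =====
def Claim_unchanged_hc6_max_consec_shifts : Prop := ∀ (array : List (List Int)) (max_consec_days : Int), Dom_hc6_max_consec_shifts array max_consec_days → Spec_hc6_max_consec_shifts array max_consec_days (hc6_max_consec_shifts array max_consec_days)
def Claim_changed_hc6_max_consec_shifts : Prop := Dom_hc6_max_consec_shifts (pvDiffWitness_hc6_max_consec_shifts.1) (pvDiffWitness_hc6_max_consec_shifts.2) ∧ D_hc6_max_consec_shifts (pvDiffWitness_hc6_max_consec_shifts.1) (pvDiffWitness_hc6_max_consec_shifts.2) ∧ hc6_max_consec_shifts (pvDiffWitness_hc6_max_consec_shifts.1) (pvDiffWitness_hc6_max_consec_shifts.2) = pvDiffWitnessOut_hc6_max_consec_shifts.1 ∧ hc6_max_consec_shifts_alt (pvDiffWitness_hc6_max_consec_shifts.1) (pvDiffWitness_hc6_max_consec_shifts.2) = pvDiffWitnessOut_hc6_max_consec_shifts.2 ∧ pvDiffWitnessOut_hc6_max_consec_shifts.1 ≠ pvDiffWitnessOut_hc6_max_consec_s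hifts.2
def Claim_exact_hc6_max_consec_shifts : Prop := ∀ (array : List (List Int)) (max_consec_days : Int), Dom_hc6_max_consec_shifts array max_consec_days → D_hc6_max_consec_shifts array max_consec_days → hc6_max_consec_shifts array max_consec_days ≠ hc6_max_consec_shifts_alt array max_consec_days

-- ===== LEMMAS AND PROOFS =====

-- the per-run check B applies
def pvP (m : Int) (r : Nat) : Bool := decide ((r : Int) ≤ m)

-- the fold only ever appends to the runs list
theorem pvFoldl_fst_prefix (xs : List Int) : ∀ (runs : List Nat) (cur : Nat),
    ∃ t : List Nat × Nat, List.foldl pvStep (runs, cur) xs = (runs ++ t.1, t.2) := by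
  induction xs with
  | nil => intro runs cur; exact ⟨([], cur), by simp⟩
  | cons x xs ih =>
    intro runs cur
    by_cases hx : x > 0
    · obtain ⟨t, ht⟩ := ih runs (cur + 1)
      exact ⟨t, by simpa [pvStep, hx] using ht⟩
    · by_cases hc : cur ≠ 0
      · obtain ⟨t, ht⟩ := ih (runs ++ [cur]) 0
        exact ⟨([cur] ++ t.1, t.2), by simp [pvStep, hx, hc] at ht ⊢; simpa using ht⟩
      · obtain ⟨t, ht⟩ := ih runs cur
        exact ⟨t, by simp at hc; simpa [pvStep, hx, hc] using ht⟩

-- a failing run already in the accumulator stays failing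
theorem pvFail_persists (m : Int) (xs : List Int) : ∀ (runs : List Nat) (cur : Nat),
    runs.all (pvP m) = false →
    (pvFinish (List.foldl pvStep (runs, cur) xs)).all (pvP m) = false := by
  intro runs cur h
  obtain ⟨t, ht⟩ := pvFoldl_fst_prefix xs runs cur
  rw [ht]
  unfold pvFinish
  split_ifs <;> simp_all [List.all_append]

-- a current run already over the limit forces failure
theorem pvBig_cur (m : Int) (xs : List Int) : ∀ (runs : List Nat) (cur : Nat),
    cur ≠ 0 → m < (cur : Int) →
    (pvFinish (List.foldl pvStep (runs, cur) xs)).all (pvP m) = false := by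
  induction xs with
  | nil =>
    intro runs cur hc hm
    simp only [List.foldl_nil, pvFinish, if_pos hc, List.all_append, List.all_cons]
    have : pvP m cur = false := by simp [pvP]; omega
    simp [this]
  | cons x xs ih =>
    intro runs cur hc hm
    by_cases hx : x > 0
    · rw [List.foldl_cons]
      have : pvStep (runs, cur) x = (runs, cur + 1) := by simp [pvStep, hx]
      rw [this]
      exact ih runs (cur + 1) (by omega) (by push_cast; omega)
    · rw [List.foldl_cons]
      have : pvStep (runs, cur) x = (runs ++ [cur], 0) := by simp [pvStep, hx, hc]
      rw [this]
      apply pvFail_persists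
      have : pvP m cur = false := by simp [pvP]; omega
      simp [List.all_append, this]

-- main invariant for a nonnegative limit: A's counter loop = B's run check,
-- with the pending run length c and the already-flushed runs carried along
theorem pvMain (m : Int) (hm : 0 ≤ m) (xs : List Int) : ∀ (c : Nat) (runs : List Nat),
    runs.all (pvP m) = true → (c : Int) ≤ m →
    pvRowLoopA m xs (c : Int) = (pvFinish (List.foldl pvStep (runs, c) xs)).all (pvP m) := by
  induction xs with
  | nil =>
    intro c runs hruns hc
    simp only [pvRowLoopA, List.foldl_nil, pvFinish]
    split_ifs with h
    · have : pvP m c = true := by simp [pvP, hc]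
      simp [List.all_append, hruns, this]
    · simp [hruns]
  | cons x xs ih =>
    intro c runs hruns hc
    by_cases hx : x > 0
    · have hA : pvRowLoopA m (x :: xs) c =
          if (c : Int) + 1 > m then false else pvRowLoopA m xs ((c : Int) + 1) := by
        simp [pvRowLoopA, hx]
      have hB : pvStep (runs, c) x = (runs, c + 1) := by simp [pvStep, hx]
      rw [hA, List.foldl_cons, hB]
      by_cases hcm : (c : Int) + 1 > m
      · rw [if_pos hcm]
        exact (pvBig_cur m xs runs (c + 1) (by omega) (by push_cast; omega)).symm
      · rw [if_neg hcm]
        have := ih (c + 1) runs hruns (by push_cast at hcm ⊢; omega)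
        rw [← this]; push_cast; ring_nf
    · have hA : pvRowLoopA m (x :: xs) c = pvRowLoopA m xs 0 := by
        simp only [pvRowLoopA, if_neg hx]
        rw [if_neg (by omega)]
      rw [hA, List.foldl_cons]
      by_cases hc0 : c ≠ 0
      · have hB : pvStep (runs, c) x = (runs ++ [c], 0) := by simp [pvStep, hx, hc0]
        rw [hB]
        have hall : (runs ++ [c]).all (pvP m) = true := by
          have : pvP m c = true := by simp [pvP, hc]
          simp [List.all_append, hruns, this]
        simpa using ih 0 (runs ++ [c]) hall (by simpa using hm)
      · simp only [ne_eq, not_not] at hc0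
        subst hc0
        have hB : pvStep (runs, 0) x = (runs, 0) := by simp [pvStep, hx]
        rw [hB]
        simpa using ih 0 runs hruns (by simpa using hm)

-- per-row equality for a nonnegative limit
theorem pvRow_eq (m : Int) (hm : 0 ≤ m) (row : List Int) :
    pvRowLoopA m row 0 = (pvWorkRuns row).all (pvP m) := by
  have := pvMain m hm row 0 [] (by simp) (by simpa using hm)
  simpa [pvWorkRuns] using this

-- negative limit: A fails a row at its first element, so only empty rows pass
theorem pvRowLoopA_neg (m : Int) (hm : m < 0) (row : List Int) (c : Int) (hc : 0 ≤ c) :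
    pvRowLoopA m row c = row.isEmpty := by
  cases row with
  | nil => simp [pvRowLoopA]
  | cons x xs =>
    have h1 : (if x > 0 then c + 1 else 0) > m := by
      by_cases hx : x > 0 <;> simp [hx] <;> omega
    simp [pvRowLoopA, h1]

-- a row with no positive entry has no work runs
theorem pvWorkRuns_nonpos (row : List Int) (h : ∀ n ∈ row, n ≤ 0) :
    pvWorkRuns row = [] := by
  unfold pvWorkRuns
  have : List.foldl pvStep ([], 0) row = ([], 0) := by
    induction row with
    | nil => rfl
    | cons x xs ih =>
      have hx : ¬ x > 0 := by have := h x (by simp); omega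
      rw [List.foldl_cons]
      have : pvStep (([] : List Nat), 0) x = ([], 0) := by simp [pvStep, hx]
      rw [this]
      exact ih (fun n hn => h n (by simp [hn]))
  rw [this]; rfl

-- negative limit: a row containing a work day fails B's check
theorem pvRow_pos_neg (m : Int) (hm : m < 0) (row : List Int) (h : ∃ n ∈ row, 0 < n) :
    (pvWorkRuns row).all (pvP m) = false := by
  unfold pvWorkRuns
  induction row with
  | nil => simp at h
  | cons x xs ih =>
    by_cases hx : x > 0
    · rw [List.foldl_cons]
      have : pvStep (([] : List Nat), 0) x = ([], 1) := by simp [pvStep, hx]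
      rw [this]
      exact pvBig_cur m xs [] 1 (by omega) (by push_cast; omega)
    · rw [List.foldl_cons]
      have : pvStep (([] : List Nat), 0) x = ([], 0) := by simp [pvStep, hx]
      rw [this]
      apply ih
      rcases h with ⟨n, hn, hpos⟩
      rcases List.mem_cons.mp hn with rfl | hn'
      · omega
      · exact ⟨n, hn', hpos⟩

-- ===== VERDICT (by name: the statement is the Claim_ definition above) =====
theorem hc6_max_consec_shifts_spec : Claim_unchanged_hc6_max_consec_shifts := by
  intro array m _
  unfold Spec_hc6_max_consec_shifts
  intro hnD
  unfold hc6_max_consec_shifts hc6_max_consec_shifts_alt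
  by_cases hm : 0 ≤ m
  · congr 1; funext row
    exact pvRow_eq m hm row
  · push Not at hm
    by_cases hall : ∀ row ∈ array, ∀ n ∈ row, n ≤ 0
    · -- then no row may be non-empty (else D_ would hold)
      have hemp : ∀ row ∈ array, row = [] := by
        by_contra h
        push Not at h
        exact hnD ⟨hm, by rcases h with ⟨r, hr, hne⟩; exact ⟨r, hr, hne⟩, hall⟩
      have h1 : (array.all fun work_days => pvRowLoopA m work_days 0) = true :=
        List.all_eq_true.mpr (fun row hrow => by have := hemp row hrow; subst this; rfl)
      have h2 : (array.all fun row => (pvWorkRuns row).all fun r => decide ((r : Int) ≤ m)) = true :=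
        List.all_eq_true.mpr (fun row hrow => by have := hemp row hrow; subst this; rfl)
      rw [h1, h2]
    · push Not at hall
      obtain ⟨row, hrow, n, hn, hpos⟩ := hall
      have hA : pvRowLoopA m row 0 = false := by
        rw [pvRowLoopA_neg m hm row 0 le_rfl]
        cases row with
        | nil => simp at hn
        | cons _ _ => rfl
      have hB : (pvWorkRuns row).all (pvP m) = false :=
        pvRow_pos_neg m hm row ⟨n, hn, by omega⟩
      rw [List.all_eq_false.mpr ⟨row, hrow, by simp [hA]⟩,
          List.all_eq_false.mpr ⟨row, hrow, by simpa [pvP] using hB⟩]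

theorem hc6_max_consec_shifts_changed : Claim_changed_hc6_max_consec_shifts := by
  unfold Claim_changed_hc6_max_consec_shifts; decide

theorem hc6_max_consec_shifts_tight : Claim_exact_hc6_max_consec_shifts := by
  intro array m _ hD
  obtain ⟨hm, ⟨row0, hrow0, hne⟩, hall⟩ := hD
  unfold hc6_max_consec_shifts hc6_max_consec_shifts_alt
  have hA : array.all (fun work_days => pvRowLoopA m work_days 0) = false := by
    apply List.all_eq_false.mpr
    refine ⟨row0, hrow0, ?_⟩
    rw [pvRowLoopA_neg m hm row0 0 le_rfl]
    cases row0 with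
    | nil => simp at hne
    | cons _ _ => simp
  have hB : array.all (fun row => (pvWorkRuns row).all (fun r => decide ((r : Int) ≤ m))) = true := by
    rw [List.all_eq_true]
    intro row hrow
    rw [pvWorkRuns_nonpos row (hall row hrow)]
    rfl
  rw [hA, hB]
  simp
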